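-- pv_equiv track=rewrite | github.com/aryannaik225/Python-Practice | Assignment 2 Week 12.py | survival
-- ===== SOURCE A (Python) =====
-- def temperature(x,y):
--     return (30+(x**2)+(y**2)-(3*x)-(4*y))
--
-- def survival(T):
--     plate = []
--     for rows in range(0,6):
--         row = []
--         for columns in range(0,6):
--             row.append(temperature(rows,columns))
--         plate.append(row)
--     for rows in range(0,6):
--         for columns in range(0,6):
--             if plate[rows][columns] <= T:
--                 return True
--     return False
-- ===== SOURCE B (Python) =====
-- def temperature(x,y):
--     return (30+(x**2)+(y**2)-(3*x)-(4*y))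
--
-- def survival(T):
--     m = min(temperature(r, c) for r in range(6) for c in range(6))
--     return T >= m
-- ===== Notes on version B (the rewrite author's own statement) =====
-- stated objective: simpler
-- what changed: Replaced A's build-a-6x6-table-then-nested-search-with-early-return by a single min-reduction over the grid followed by one comparison (some cell <= T iff min cell <= T).
import Mathlib
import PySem

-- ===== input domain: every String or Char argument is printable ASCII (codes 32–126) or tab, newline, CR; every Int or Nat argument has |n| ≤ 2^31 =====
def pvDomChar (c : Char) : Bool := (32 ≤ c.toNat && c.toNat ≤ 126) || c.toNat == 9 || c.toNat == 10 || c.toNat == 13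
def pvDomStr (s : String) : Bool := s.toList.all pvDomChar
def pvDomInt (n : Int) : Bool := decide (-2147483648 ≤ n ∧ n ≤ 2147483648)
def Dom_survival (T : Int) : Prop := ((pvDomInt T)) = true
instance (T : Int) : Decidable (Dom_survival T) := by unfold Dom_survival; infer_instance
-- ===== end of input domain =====

-- B replaces A's table-build + nested early-exit search by a single min-reduction
-- over the same grid followed by one comparison (objective: simpler).

-- ===== PORT A =====
def temperature (x y : Int) : Int := 30 + x ^ 2 + y ^ 2 - 3 * x - 4 * y

def survival (T : Int) : Bool :=
  -- build the plate row by row, exactly as A does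
  let plate : List (List Int) :=
    (PySem.List.pyRange 0 6 1).foldl (fun plate rows =>
      plate ++ [(PySem.List.pyRange 0 6 1).foldl
        (fun row columns => row ++ [temperature rows columns]) []]) []
  -- nested search with early `return True` = short-circuiting any over both ranges;
  -- final `return False` is the any's failure value
  (PySem.List.pyRange 0 6 1).any (fun rows =>
    (PySem.List.pyRange 0 6 1).any (fun columns =>
      match PySem.List.pyGet? plate rows with
      | some r =>
        match PySem.List.pyGet? r columns with
        | some v => v ≤ T
        | none => false   -- IndexError; unreachable: indices come from range(6)
      | none => false))

-- ===== PORT B =====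
def temperature_alt (x y : Int) : Int := 30 + x ^ 2 + y ^ 2 - 3 * x - 4 * y

def survival_alt (T : Int) : Bool :=
  let temps : List Int :=
    (PySem.List.pyRange 0 6 1).flatMap (fun r =>
      (PySem.List.pyRange 0 6 1).map (fun c => temperature_alt r c))
  match PySem.List.min? temps (fun x => x) with
  | some m => decide (m ≤ T)
  | none => false  -- min([]) would raise; unreachable: temps is a fixed non-empty list

-- ===== PRECONDITION & SPEC =====
def Spec_survival (T : Int) (out : Bool) : Prop := out = survival_alt T
instance (T : Int) (out : Bool) : Decidable (Spec_survival T out) := by unfold Spec_survival; infer_instance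

-- ===== CLAIM (what is proved, stated in full; the proofs are below) =====
def Claim_equal_survival : Prop := ∀ (T : Int), Dom_survival T → Spec_survival T (survival T)

-- ===== LEMMAS AND PROOFS =====
lemma pyRange06 : PySem.List.pyRange 0 6 1 = [0, 1, 2, 3, 4, 5] := by decide

lemma plate_eval : (PySem.List.pyRange 0 6 1).foldl (fun plate rows =>
      plate ++ [(PySem.List.pyRange 0 6 1).foldl
        (fun row columns => row ++ [temperature rows columns]) []]) ([] : List (List Int))
    = [[30,27,26,27,30,35],[28,25,24,25,28,33],[28,25,24,25,28,33],[30,27,26,27,30,35],[34,31,30,31,34,39],[40,37,36,37,40,45]] := by decide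

set_option maxHeartbeats 1000000 in
lemma survival_eval (T : Int) : survival T = decide (24 ≤ T) := by
  unfold survival
  rw [plate_eval, pyRange06]
  norm_num [List.any_cons, PySem.List.pyGet?, PySem.List.pyIdx?]
  by_cases h : (24:Int) ≤ T
  · simp [h]
  · simp [h]
    omega

lemma temps_min_eval : PySem.List.min?
    ((PySem.List.pyRange 0 6 1).flatMap (fun r =>
      (PySem.List.pyRange 0 6 1).map (fun c => temperature_alt r c))) (fun x => x)
    = some 24 := by decide

lemma survival_alt_eval (T : Int) : survival_alt T = decide (24 ≤ T) := by
  simp only [survival_alt, temps_min_eval]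

-- ===== VERDICT (by name: the statement is the Claim_ definition above) =====
theorem survival_spec : Claim_equal_survival := by
  intro T _
  unfold Spec_survival
  rw [survival_eval, survival_alt_eval]
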